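-- pv_equiv track=rewrite | github.com/tamuctf/TAMUctf-2020 | Reversing/about_time/solution.py | decrypt3
-- ===== SOURCE A (Python) =====
-- def decrypt3(encrypted, value):
--     #undo the numeral addition
--     decrypted = ''
--     for i,char in enumerate(encrypted):
--         #make note that the source binary adds to the numerals.
--         #This means that they can be characters not between '0' and '9'
--         if ord(char) >= ord('0') and ord(char) < ord('A'):
--             decrypted += chr(ord(char) - value)
--         else:
--             decrypted += char
--     return decrypted
-- ===== SOURCE B (Python) =====
-- def decrypt3(encrypted, value):
--     # Build a translation table once (ordinals kept as ints so errors stay lazy,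
--     # firing only when a matching character is present), then one translate pass.
--     table = {cp: cp - value for cp in range(ord('0'), ord('A'))}
--     return encrypted.translate(table)
-- ===== Notes on version B (the rewrite author's own statement) =====
-- stated objective: faster
-- what changed: B replaces the per-character loop with branch and repeated string concatenation by a precomputed ordinal translation table (dict comprehension over range(ord('0'), ord('A'))) applied in a single C-level str.translate pass.
import Mathlib
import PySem

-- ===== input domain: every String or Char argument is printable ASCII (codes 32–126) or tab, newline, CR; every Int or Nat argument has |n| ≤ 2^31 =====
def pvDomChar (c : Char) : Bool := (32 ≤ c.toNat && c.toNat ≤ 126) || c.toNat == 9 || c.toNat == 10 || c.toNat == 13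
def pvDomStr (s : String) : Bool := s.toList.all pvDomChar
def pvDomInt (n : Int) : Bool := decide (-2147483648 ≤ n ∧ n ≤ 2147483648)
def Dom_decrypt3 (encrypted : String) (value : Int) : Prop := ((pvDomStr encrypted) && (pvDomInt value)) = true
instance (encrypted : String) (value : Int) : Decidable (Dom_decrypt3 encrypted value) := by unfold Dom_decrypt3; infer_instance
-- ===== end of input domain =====

-- B replaces A's per-character loop-with-branch by a precomputed translation table
-- (dict of ordinal shifts) applied in one translate pass (measured faster in a timing run).

-- ===== PORT A =====
def decrypt3 (encrypted : String) (value : Int) : String :=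
  String.mk ((PySem.List.enumerate encrypted.toList).foldl
    (fun decrypted ic =>
      let char := ic.2
      if 48 ≤ char.toNat ∧ char.toNat < 65 then
        decrypted ++ [Char.ofNat ((char.toNat : Int) - value).toNat]   -- chr(ord(char) - value); Pre_ keeps the argument a valid codepoint
      else
        decrypted ++ [char]) [])

-- ===== PORT B =====
def decrypt3_alt (encrypted : String) (value : Int) : String :=
  -- table = {cp: cp - value for cp in range(ord('0'), ord('A'))}
  let table : PySem.Dict Int Int :=
    (PySem.List.pyRange 48 65 1).foldl (fun d cp => d.insert cp (cp - value)) PySem.Dict.empty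
  -- encrypted.translate(table): each char's ordinal looked up; hit ↦ chr(mapped ordinal), miss ↦ char
  String.mk (encrypted.toList.map (fun c =>
    match table.get? (c.toNat : Int) with
    | some v => Char.ofNat v.toNat
    | none => c))

-- ===== PRECONDITION & SPEC =====
-- Pre_ excludes exactly the inputs where A raises ValueError (chr() argument outside
-- range(0x110000)) or returns a string containing a surrogate codepoint, which is not a
-- value of the Lean String type (there B returns the same surrogate string).
def Pre_decrypt3 (encrypted : String) (value : Int) : Prop :=
  (encrypted.toList.all fun c =>
    (48 ≤ c.toNat ∧ c.toNat < 65) →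
      (0 ≤ (c.toNat : Int) - value ∧
        ((c.toNat : Int) - value < 55296 ∨
          (57343 < (c.toNat : Int) - value ∧ (c.toNat : Int) - value < 1114112)))) = true
instance (encrypted : String) (value : Int) : Decidable (Pre_decrypt3 encrypted value) := by
  unfold Pre_decrypt3; infer_instance

def pvWitness_decrypt3 : String × Int := ("09", 3)

def Spec_decrypt3 (encrypted : String) (value : Int) (out : String) : Prop := out = decrypt3_alt encrypted value
instance (encrypted : String) (value : Int) (out : String) : Decidable (Spec_decrypt3 encrypted value out) := by unfold Spec_decrypt3; infer_instance

-- ===== CLAIM (what is proved, stated in full; the proofs are below) =====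
def Claim_equal_decrypt3 : Prop := ∀ (encrypted : String) (value : Int), Dom_decrypt3 encrypted value → Pre_decrypt3 encrypted value → Spec_decrypt3 encrypted value (decrypt3 encrypted value)

-- ===== LEMMAS AND PROOFS =====

-- get? after the table-building fold: shift for keys inserted, fall through otherwise.
theorem get?_fold (value : Int) (l : List Int) (d : PySem.Dict Int Int) (c : Int) :
    (l.foldl (fun d cp => d.insert cp (cp - value)) d).get? c
      = if c ∈ l then some (c - value) else d.get? c := by
  induction l generalizing d with
  | nil => simp
  | cons a t ih =>
    simp only [List.foldl_cons, ih, PySem.Dict.get?_insert, List.mem_cons]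
    by_cases h1 : c ∈ t
    · simp [h1]
    · by_cases h2 : c = a
      · subst h2; simp [h1]
      · simp [h1, h2]

-- B's table looks up c as: shift by value inside [48,65), miss outside.
theorem table_get (value c : Int) :
    PySem.Dict.get?
      ((PySem.List.pyRange 48 65 1).foldl (fun d cp => d.insert cp (cp - value)) PySem.Dict.empty) c
      = if 48 ≤ c ∧ c < 65 then some (c - value) else none := by
  rw [get?_fold]
  by_cases h : 48 ≤ c ∧ c < 65
  · simp [PySem.List.mem_pyRange_one, h]
  · simp [PySem.List.mem_pyRange_one, h, PySem.Dict.get?_empty]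

theorem decrypt3_eq_map (encrypted : String) (value : Int) :
    decrypt3 encrypted value = String.mk (encrypted.toList.map (fun c =>
      if 48 ≤ c.toNat ∧ c.toNat < 65 then Char.ofNat ((c.toNat : Int) - value).toNat else c)) := by
  unfold decrypt3
  congr 1
  have hstep : (fun (decrypted : List Char) (ic : Int × Char) =>
      let char := ic.2
      if 48 ≤ char.toNat ∧ char.toNat < 65 then
        decrypted ++ [Char.ofNat ((char.toNat : Int) - value).toNat]
      else
        decrypted ++ [char])
      = fun decrypted ic => decrypted ++
          [if 48 ≤ ic.2.toNat ∧ ic.2.toNat < 65 then Char.ofNat ((ic.2.toNat : Int) - value).toNat else ic.2] := by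
    funext d ic; by_cases h : 48 ≤ ic.2.toNat ∧ ic.2.toNat < 65 <;> simp [h]
  rw [hstep, PySem.List.foldl_append_singleton_eq_map, List.nil_append]
  rw [show (fun (ic : Int × Char) =>
      if 48 ≤ ic.2.toNat ∧ ic.2.toNat < 65 then Char.ofNat ((ic.2.toNat : Int) - value).toNat else ic.2)
      = (fun c => if 48 ≤ c.toNat ∧ c.toNat < 65 then Char.ofNat ((c.toNat : Int) - value).toNat else c) ∘ (·.2)
      from rfl]
  rw [← List.map_map, PySem.List.map_snd_enumerate]

-- ===== VERDICT (by name: the statement is the Claim_ definition above) =====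
theorem decrypt3_spec : Claim_equal_decrypt3 := by
  intro encrypted value _hDom _hPre
  unfold Spec_decrypt3
  have halt : decrypt3_alt encrypted value = String.mk (encrypted.toList.map (fun c =>
      match PySem.Dict.get?
          ((PySem.List.pyRange 48 65 1).foldl (fun d cp => d.insert cp (cp - value))
            PySem.Dict.empty) (c.toNat : Int) with
      | some v => Char.ofNat v.toNat
      | none => c)) := rfl
  rw [decrypt3_eq_map, halt]
  refine congrArg String.mk (List.map_congr_left ?_)
  intro c _hc
  rw [table_get]
  by_cases h' : 48 ≤ (c.toNat : Int) ∧ (c.toNat : Int) < 65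
  · have h : 48 ≤ c.toNat ∧ c.toNat < 65 := by omega
    rw [if_pos h, if_pos h']
  · have h : ¬ (48 ≤ c.toNat ∧ c.toNat < 65) := by omega
    rw [if_neg h, if_neg h']
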